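-- pv_equiv track=rewrite | github.com/kamekingdom/at-coder | abs/d.py | count_black_cells
-- ===== SOURCE A (Python) =====
-- def count_black_cells(A, B, C, D):
--     # Adjust coordinates to handle full and partial blocks
--     A_adj = (A + 1000000000) % 2
--     B_adj = (B + 1000000000) % 2
--     C_adj = (C + 1000000000) % 2
--     D_adj = (D + 1000000000) % 2
--
--     # Calculate the width and height of the rectangle
--     width = C - A
--     height = D - B
--
--     # Calculate the number of full 2x2 blocks
--     full_blocks = (width // 2) * (height // 2) * 2
--
--     # Initialize black cells count with full blocks contribution
--     black_cells = full_blocks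
--
--     # Handle remaining columns (partial blocks on the right side)
--     if width % 2 != 0:
--         for y in range(B, D):
--             if (C - 1 + y) % 2 == 0:
--                 black_cells += 1
--
--     # Handle remaining rows (partial blocks on the top side)
--     if height % 2 != 0:
--         for x in range(A, C):
--             if (x + D - 1) % 2 == 0:
--                 black_cells += 1
--
--     # Adjust for the bottom-right corner cell if both dimensions have remainders
--     if width % 2 != 0 and height % 2 != 0:
--         if (C - 1 + D - 1) % 2 == 0:
--             black_cells -= 1  # Already counted twice
--
--     return black_cells * 2
-- ===== SOURCE B (Python) =====
-- def _parity_count(lo, hi, r):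
--     # number of integers y in [lo, hi) with y % 2 == r (r in {0,1})
--     if hi <= lo:
--         return 0
--     return (hi - r + 1) // 2 - (lo - r + 1) // 2
--
-- def count_black_cells(A, B, C, D):
--     width = C - A
--     height = D - B
--     black = (width // 2) * (height // 2) * 2
--     if width % 2 != 0:
--         black += _parity_count(B, D, (1 - C) % 2)
--     if height % 2 != 0:
--         black += _parity_count(A, C, (1 - D) % 2)
--     if width % 2 != 0 and height % 2 != 0 and (C + D) % 2 == 0:
--         black -= 1
--     return black * 2
-- ===== Notes on version B (the rewrite author's own statement) =====
-- stated objective: faster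
-- what changed: Replaced A's two loops over range(B,D)/range(A,C) that count cells of a given parity by a closed-form count of integers of each parity in a half-open interval, making the function O(1) instead of O(width+height).
import Mathlib
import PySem

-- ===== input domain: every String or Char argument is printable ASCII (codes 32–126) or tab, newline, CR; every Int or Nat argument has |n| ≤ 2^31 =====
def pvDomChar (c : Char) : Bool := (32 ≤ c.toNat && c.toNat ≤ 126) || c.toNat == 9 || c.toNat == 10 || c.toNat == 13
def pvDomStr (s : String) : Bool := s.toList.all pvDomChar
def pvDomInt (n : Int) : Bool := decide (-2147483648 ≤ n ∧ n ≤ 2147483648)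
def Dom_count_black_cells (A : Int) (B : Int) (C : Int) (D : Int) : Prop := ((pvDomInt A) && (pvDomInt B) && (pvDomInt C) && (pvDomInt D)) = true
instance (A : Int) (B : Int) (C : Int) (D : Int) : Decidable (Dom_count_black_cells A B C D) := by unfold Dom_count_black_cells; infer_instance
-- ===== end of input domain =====

-- B replaces A's two O(height)/O(width) parity-counting loops by closed-form counts of
-- integers of a given parity in a half-open range (O(1)); same return value everywhere.

-- ===== PORT A =====
def count_black_cells (A : Int) (B : Int) (C : Int) (D : Int) : Int :=
  -- the four *_adj variables in A are computed and never used; ported for faithfulness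
  let _A_adj := PySem.Int.mod (A + 1000000000) 2
  let _B_adj := PySem.Int.mod (B + 1000000000) 2
  let _C_adj := PySem.Int.mod (C + 1000000000) 2
  let _D_adj := PySem.Int.mod (D + 1000000000) 2
  let width := C - A
  let height := D - B
  let full_blocks := (PySem.Int.floordiv width 2) * (PySem.Int.floordiv height 2) * 2
  let black_cells := full_blocks
  let black_cells :=
    if PySem.Int.mod width 2 ≠ 0 then
      (PySem.List.pyRange B D 1).foldl
        (fun acc y => if PySem.Int.mod (C - 1 + y) 2 = 0 then acc + 1 else acc) black_cells
    else black_cells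
  let black_cells :=
    if PySem.Int.mod height 2 ≠ 0 then
      (PySem.List.pyRange A C 1).foldl
        (fun acc x => if PySem.Int.mod (x + D - 1) 2 = 0 then acc + 1 else acc) black_cells
    else black_cells
  let black_cells :=
    if PySem.Int.mod width 2 ≠ 0 ∧ PySem.Int.mod height 2 ≠ 0 then
      if PySem.Int.mod (C - 1 + D - 1) 2 = 0 then black_cells - 1 else black_cells
    else black_cells
  black_cells * 2

-- ===== PORT B =====
-- number of integers y in [lo, hi) with y % 2 == r
def parityCount (lo : Int) (hi : Int) (r : Int) : Int :=
  if hi ≤ lo then 0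
  else PySem.Int.floordiv (hi - r + 1) 2 - PySem.Int.floordiv (lo - r + 1) 2

def count_black_cells_alt (A : Int) (B : Int) (C : Int) (D : Int) : Int :=
  let width := C - A
  let height := D - B
  let black := (PySem.Int.floordiv width 2) * (PySem.Int.floordiv height 2) * 2
  let black := if PySem.Int.mod width 2 ≠ 0 then
      black + parityCount B D (PySem.Int.mod (1 - C) 2) else black
  let black := if PySem.Int.mod height 2 ≠ 0 then
      black + parityCount A C (PySem.Int.mod (1 - D) 2) else black
  let black := if PySem.Int.mod width 2 ≠ 0 ∧ PySem.Int.mod height 2 ≠ 0 ∧ PySem.Int.mod (C + D) 2 = 0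
      then black - 1 else black
  black * 2

-- ===== PRECONDITION & SPEC =====
def Spec_count_black_cells (A : Int) (B : Int) (C : Int) (D : Int) (out : Int) : Prop := out = count_black_cells_alt A B C D
instance (A : Int) (B : Int) (C : Int) (D : Int) (out : Int) : Decidable (Spec_count_black_cells A B C D out) := by unfold Spec_count_black_cells; infer_instance

-- ===== CLAIM (what is proved, stated in full; the proofs are below) =====
def Claim_equal_count_black_cells : Prop := ∀ (A : Int) (B : Int) (C : Int) (D : Int), Dom_count_black_cells A B C D → Spec_count_black_cells A B C D (count_black_cells A B C D)

-- ===== LEMMAS AND PROOFS =====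

-- the parity-counting loop shifted by an accumulator
theorem foldl_count_acc (c : Int) (ys : List Int) (acc : Int) :
    ys.foldl (fun a y => if PySem.Int.mod (c + y) 2 = 0 then a + 1 else a) acc
      = acc + ys.foldl (fun a y => if PySem.Int.mod (c + y) 2 = 0 then a + 1 else a) 0 := by
  induction ys generalizing acc with
  | nil => simp
  | cons y ys ih =>
    simp only [List.foldl_cons]
    rw [ih, ih (if PySem.Int.mod (c + y) 2 = 0 then 0 + 1 else 0)]
    split <;> ring

-- A's loop over range(lo, hi) counting (c + y) % 2 == 0 equals B's closed form
theorem loop_eq_parityCount (c lo hi : Int) :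
    (PySem.List.pyRange lo hi 1).foldl
        (fun a y => if PySem.Int.mod (c + y) 2 = 0 then a + 1 else a) 0
      = parityCount lo hi (PySem.Int.mod (-c) 2) := by
  by_cases hle : hi ≤ lo
  · rw [PySem.List.pyRange_one_eq_nil hle]
    simp [parityCount, hle]
  · rw [Int.not_le] at hle
    have hn : (hi - lo).toNat ≠ 0 := by omega
    obtain ⟨n, hn'⟩ : ∃ n, (hi - lo).toNat = n + 1 := ⟨(hi - lo).toNat - 1, by omega⟩
    clear hn
    induction n generalizing lo with
    | zero =>
      have : hi = lo + 1 := by omega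
      subst this
      rw [PySem.List.pyRange_one_singleton]
      simp only [List.foldl_cons, List.foldl_nil, parityCount,
        PySem.Int.mod_eq_emod_of_pos (by norm_num : (0:Int) < 2),
        PySem.Int.floordiv_eq_ediv_of_pos (by norm_num : (0:Int) < 2)]
      split_ifs with h1 h2 h2 <;> omega
    | succ m ih =>
      rw [PySem.List.pyRange_one_cons hle, List.foldl_cons, foldl_count_acc,
        ih (lo + 1) (by omega) (by omega)]
      simp only [parityCount,
        PySem.Int.mod_eq_emod_of_pos (by norm_num : (0:Int) < 2),
        PySem.Int.floordiv_eq_ediv_of_pos (by norm_num : (0:Int) < 2)]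
      split_ifs with h1 h2 h3 h2 h3 <;> omega

-- ===== VERDICT (by name: the statement is the Claim_ definition above) =====
theorem mod_neg_sub_one (C : Int) :
    PySem.Int.mod (-(C - 1)) 2 = PySem.Int.mod (1 - C) 2 := by ring_nf

theorem loop_acc_eq (c lo hi acc : Int) :
    (PySem.List.pyRange lo hi 1).foldl
        (fun a y => if PySem.Int.mod (c + y) 2 = 0 then a + 1 else a) acc
      = acc + parityCount lo hi (PySem.Int.mod (-c) 2) := by
  rw [foldl_count_acc, loop_eq_parityCount]

theorem count_black_cells_spec : Claim_equal_count_black_cells := by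
  intro A B C D _
  show count_black_cells A B C D = count_black_cells_alt A B C D
  unfold count_black_cells count_black_cells_alt
  have hc : ∀ x : Int, x + D - 1 = (D - 1) + x := by intro x; ring
  simp only [hc, loop_acc_eq, mod_neg_sub_one]
  split_ifs <;>
    first
      | ring1
      | (exfalso
         simp only [PySem.Int.mod_eq_emod_of_pos (by norm_num : (0:Int) < 2)] at *
         omega)
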